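-- pv_equiv track=rewrite | github.com/LazyCentaur/the_power_projects | 3_Python/katas/24.py | calcula_diferencia
-- ===== SOURCE A (Python) =====
-- from functools import reduce
--
-- def calcula_diferencia(nums):
--     """_summary_
--
--     Args:
--         nums (list): lista de int
--
--     Returns:
--         int: devuelve la diferencia
--     """
--     if len(nums) < 2:
--         return 0
--
--     for i, x in enumerate(nums):
--         if not isinstance(x, (int, float)) or isinstance(x, bool):
--             raise TypeError(f"Elemento inválido en posición {i}: {x!r}")
--
--     _, resultado = reduce(
--         lambda acc, x: (x, acc[1] + abs(x - acc[0])),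
--         nums[1:],
--         (nums[0], 0)
--     )
--     return resultado
-- ===== SOURCE B (Python) =====
-- def calcula_diferencia(nums):
--     if len(nums) < 2:
--         return 0
--     for i, x in enumerate(nums):
--         if not isinstance(x, (int, float)) or isinstance(x, bool):
--             raise TypeError(f"Elemento inválido en posición {i}: {x!r}")
--     return sum(abs(a - b) for a, b in zip(nums, nums[1:]))
-- ===== Notes on version B (the rewrite author's own statement) =====
-- stated objective: idiomatic
-- what changed: Replaced the reduce with a threaded (prev, acc) tuple accumulator by zipping the list with its tail and summing absolute pairwise differences.
import Mathlib
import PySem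

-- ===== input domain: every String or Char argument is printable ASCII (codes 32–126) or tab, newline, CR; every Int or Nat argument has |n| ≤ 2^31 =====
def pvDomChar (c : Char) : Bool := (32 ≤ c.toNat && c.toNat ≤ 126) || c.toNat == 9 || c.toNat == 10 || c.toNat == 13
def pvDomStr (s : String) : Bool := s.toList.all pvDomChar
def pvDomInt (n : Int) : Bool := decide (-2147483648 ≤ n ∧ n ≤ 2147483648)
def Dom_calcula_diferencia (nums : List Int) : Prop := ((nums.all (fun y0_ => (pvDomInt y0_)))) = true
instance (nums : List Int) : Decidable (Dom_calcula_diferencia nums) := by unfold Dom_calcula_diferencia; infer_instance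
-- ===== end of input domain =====

-- B replaces A's reduce with a threaded (prev, acc) tuple by a zip of the list with
-- its tail and a sum of absolute pairwise differences (idiomatic; same cost).
-- A's element-validation loop never raises on List Int (every element is an int),
-- so both ports omit it and A is total on this domain.

-- ===== PORT A =====
-- reduce(lambda acc, x: (x, acc[1] + abs(x - acc[0])), nums[1:], (nums[0], 0))
def calcula_diferencia (nums : List Int) : Int :=
  if nums.length < 2 then 0
  else
    let init : Int × Int := (nums.headI, 0)
    let r := (PySem.List.slice nums (some 1) none).foldl
      (fun acc x => (x, acc.2 + |x - acc.1|)) init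
    r.2

-- ===== PORT B =====
-- sum(abs(a - b) for a, b in zip(nums, nums[1:]))
def calcula_diferencia_alt (nums : List Int) : Int :=
  if nums.length < 2 then 0
  else ((nums.zip (PySem.List.slice nums (some 1) none)).map
          (fun p => |p.1 - p.2|)).sum

-- ===== PRECONDITION & SPEC =====
def Spec_calcula_diferencia (nums : List Int) (out : Int) : Prop := out = calcula_diferencia_alt nums
instance (nums : List Int) (out : Int) : Decidable (Spec_calcula_diferencia nums out) := by unfold Spec_calcula_diferencia; infer_instance

-- ===== CLAIM (what is proved, stated in full; the proofs are below) =====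
def Claim_equal_calcula_diferencia : Prop := ∀ (nums : List Int), Dom_calcula_diferencia nums → Spec_calcula_diferencia nums (calcula_diferencia nums)

-- ===== LEMMAS AND PROOFS =====

theorem pv_slice_one (nums : List Int) :
    PySem.List.slice nums (some 1) none = nums.drop 1 := by
  simpa using PySem.List.slice_from_one nums

theorem pv_fold_zip (t : List Int) : ∀ (p a : Int),
    (t.foldl (fun acc x => (x, acc.2 + |x - acc.1|)) (p, a)).2
      = a + (((p :: t).zip t).map (fun q => |q.1 - q.2|)).sum := by
  induction t with
  | nil => intro p a; simp
  | cons x xs ih =>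
      intro p a
      simp only [List.foldl_cons, List.zip_cons_cons, List.map_cons, List.sum_cons]
      rw [ih x (a + |x - p|), abs_sub_comm p x]
      ring

-- ===== VERDICT (by name: the statement is the Claim_ definition above) =====
theorem calcula_diferencia_spec : Claim_equal_calcula_diferencia := by
  intro nums _
  unfold Spec_calcula_diferencia calcula_diferencia calcula_diferencia_alt
  by_cases h : nums.length < 2
  · simp [h]
  · simp only [h, if_false]
    rw [pv_slice_one]
    match nums, h with
    | x :: xs, _ =>
        simp only [List.headI, List.drop_one, List.tail_cons]
        rw [pv_fold_zip xs x 0]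
        simp
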